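-- pv_equiv track=rewrite | github.com/jochettino/foos | plugins/sound.py | get_unique_winner
-- ===== SOURCE A (Python) =====
-- def get_unique_winner(points):
--     max_score = 0
--     player = None
--     for name, ps in points.items():
--         if ps > max_score:
--             max_score = ps
--             player = name
--         elif ps == max_score:
--             player = None
--     return player
-- ===== SOURCE B (Python) =====
-- def get_unique_winner(points):
--     if not points:
--         return None
--     best = max(points.values())
--     if best <= 0:
--         return None
--     winners = [name for name, ps in points.items() if ps == best]
--     return winners[0] if len(winners) == 1 else None
-- ===== Notes on version B (the rewrite author's own statement) =====
-- stated objective: simpler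
-- what changed: Replaces the single running-max scan with tie-reset state by a max() pass followed by a filter of the names achieving that max, returning the name only when it is unique and positive.
import Mathlib
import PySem

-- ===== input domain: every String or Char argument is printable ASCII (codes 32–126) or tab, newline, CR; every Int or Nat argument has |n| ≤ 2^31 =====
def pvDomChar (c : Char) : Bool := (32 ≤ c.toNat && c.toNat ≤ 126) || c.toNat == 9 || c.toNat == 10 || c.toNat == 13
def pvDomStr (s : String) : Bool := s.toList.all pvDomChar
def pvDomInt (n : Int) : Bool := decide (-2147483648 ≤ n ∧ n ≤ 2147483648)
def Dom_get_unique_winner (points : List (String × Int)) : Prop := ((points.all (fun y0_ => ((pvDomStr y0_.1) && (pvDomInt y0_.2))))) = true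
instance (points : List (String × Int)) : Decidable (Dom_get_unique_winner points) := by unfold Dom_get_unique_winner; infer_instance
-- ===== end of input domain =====

-- B replaces A's single running-max scan with tie-reset state by a max() pass plus a
-- filter of the names achieving that max (objective: simpler).

-- ===== PORT A =====
-- A's loop body: running (max_score, player) state with tie reset.
def pvStep (st : Int × Option String) (np : String × Int) : Int × Option String :=
  if st.1 < np.2 then (np.2, some np.1)
  else if np.2 = st.1 then (st.1, none)
  else st

def get_unique_winner (points : List (String × Int)) : Option String :=
  (points.foldl pvStep ((0 : Int), (none : Option String))).2

-- ===== PORT B =====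
def get_unique_winner_alt (points : List (String × Int)) : Option String :=
  if points.isEmpty then none
  else
    match PySem.List.max? (points.map Prod.snd) (fun y => y) with
    | none => none
    | some best =>
      if best ≤ 0 then none
      else
        let winners := (points.filter (fun np => np.2 == best)).map Prod.fst
        if winners.length = 1 then PySem.List.pyGet? winners 0 else none

-- ===== PRECONDITION & SPEC =====
def Spec_get_unique_winner (points : List (String × Int)) (out : Option String) : Prop := out = get_unique_winner_alt points
instance (points : List (String × Int)) (out : Option String) : Decidable (Spec_get_unique_winner points out) := by unfold Spec_get_unique_winner; infer_instance

-- ===== CLAIM (what is proved, stated in full; the proofs are below) =====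
def Claim_equal_get_unique_winner : Prop := ∀ (points : List (String × Int)), Dom_get_unique_winner points → Spec_get_unique_winner points (get_unique_winner points)

-- ===== LEMMAS AND PROOFS =====

-- running maximum of the scores, seeded with m
def pvMaxSnd (l : List (String × Int)) (m : Int) : Int :=
  l.foldl (fun a x => max a x.2) m

-- closed form of A's loop result from state (m, p)
def pvSpec (l : List (String × Int)) (m : Int) (p : Option String) : Option String :=
  if m < pvMaxSnd l m then
    (if (l.filter (fun x => x.2 == pvMaxSnd l m)).length = 1
     then (l.find? (fun x => x.2 == pvMaxSnd l m)).map Prod.fst else none)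
  else if l.any (fun x => x.2 == m) then none else p

theorem pvMaxSnd_ge : ∀ (l : List (String × Int)) (m : Int), m ≤ pvMaxSnd l m := by
  intro l
  induction l with
  | nil => intro m; simp [pvMaxSnd]
  | cons x t ih =>
      intro m
      have h := ih (max m x.2)
      simp only [pvMaxSnd, List.foldl_cons] at *
      exact le_trans (le_max_left m x.2) h

theorem pvMaxSnd_cons (x : String × Int) (t : List (String × Int)) (m : Int) :
    pvMaxSnd (x :: t) m = pvMaxSnd t (max m x.2) := by
  simp [pvMaxSnd]

theorem pvFilter_len_pos_iff_any (l : List (String × Int)) (p : String × Int → Bool) :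
    (0 < (l.filter p).length) ↔ l.any p = true := by
  rw [List.length_pos_iff, Ne, List.filter_eq_nil_iff]
  simp [List.any_eq_true]

theorem pvFind_eq_head_filter (l : List (String × Int)) (p : String × Int → Bool) :
    l.find? p = (l.filter p).head? := by
  induction l with
  | nil => simp
  | cons x t ih =>
      by_cases h : p x = true
      · rw [List.find?_cons_of_pos h, List.filter_cons_of_pos h, List.head?_cons]
      · rw [List.find?_cons_of_neg h, List.filter_cons_of_neg h, ih]

theorem pvFold_snd : ∀ (l : List (String × Int)) (m : Int) (p : Option String),
    (l.foldl pvStep (m, p)).2 = pvSpec l m p := by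
  intro l
  induction l with
  | nil =>
      intro m p
      simp [pvSpec, pvMaxSnd]
  | cons x t ih =>
      intro m p
      simp only [List.foldl_cons, pvStep]
      by_cases h1 : m < x.2
      · -- raise branch: new state (x.2, some x.1)
        simp only [h1, if_true]
        rw [ih]
        have hmx : max m x.2 = x.2 := by omega
        have hMcons : pvMaxSnd (x :: t) m = pvMaxSnd t x.2 := by
          rw [pvMaxSnd_cons, hmx]
        have hvM : x.2 ≤ pvMaxSnd t x.2 := pvMaxSnd_ge t x.2
        by_cases h2 : x.2 < pvMaxSnd t x.2
        · -- the new score is later beaten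
          have hpx : ¬ ((fun (y : String × Int) => y.2 == pvMaxSnd (x :: t) m) x) = true := by
            simp only [hMcons]; simp; omega
          have hfil : List.filter (fun (y : String × Int) => y.2 == pvMaxSnd (x :: t) m) (x :: t)
              = List.filter (fun y => y.2 == pvMaxSnd (x :: t) m) t := List.filter_cons_of_neg hpx
          have hfind : List.find? (fun (y : String × Int) => y.2 == pvMaxSnd (x :: t) m) (x :: t)
              = List.find? (fun y => y.2 == pvMaxSnd (x :: t) m) t := List.find?_cons_of_neg hpx
          unfold pvSpec
          rw [hfil, hfind, hMcons]
          have hmM : m < pvMaxSnd t x.2 := lt_trans h1 h2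
          simp only [h2, if_true, hmM]
        · -- x.2 is the overall maximum
          have hMv : pvMaxSnd t x.2 = x.2 := by omega
          have hpx : ((fun (y : String × Int) => y.2 == pvMaxSnd (x :: t) m) x) = true := by
            simp [hMcons, hMv]
          have hfil : List.filter (fun (y : String × Int) => y.2 == pvMaxSnd (x :: t) m) (x :: t)
              = x :: List.filter (fun y => y.2 == pvMaxSnd (x :: t) m) t := List.filter_cons_of_pos hpx
          have hfind : List.find? (fun (y : String × Int) => y.2 == pvMaxSnd (x :: t) m) (x :: t)
              = some x := List.find?_cons_of_pos hpx
          unfold pvSpec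
          rw [hfil, hfind, hMcons, hMv]
          simp only [h1, if_true, List.length_cons, Option.map_some]
          by_cases h3 : t.any (fun y => y.2 == x.2) = true
          · -- duplicated maximum
            have hpos : 0 < (t.filter (fun y => y.2 == x.2)).length := by
              rw [pvFilter_len_pos_iff_any]; exact h3
            have hlen : ¬ ((t.filter (fun y => y.2 == x.2)).length + 1 = 1) := by omega
            simp only [h3, if_true, hlen, if_false]
            simp
          · -- unique maximum x
            have hnil : (t.filter (fun y => y.2 == x.2)) = [] := by
              rw [List.filter_eq_nil_iff]
              intro y hy hc
              exact h3 (List.any_eq_true.mpr ⟨y, hy, by simpa using hc⟩)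
            simp only [h3, hnil, List.length_nil, if_true]
            simp
      · -- no raise
        simp only [h1, if_false]
        have hmx : max m x.2 = m := by omega
        have hMcons : pvMaxSnd (x :: t) m = pvMaxSnd t m := by
          rw [pvMaxSnd_cons, hmx]
        have hmM : m ≤ pvMaxSnd t m := pvMaxSnd_ge t m
        by_cases h2 : x.2 = m
        · -- tie with current max: player reset
          simp only [h2, if_true]
          rw [ih]
          by_cases h3 : m < pvMaxSnd t m
          · have hpx : ¬ ((fun (y : String × Int) => y.2 == pvMaxSnd (x :: t) m) x) = true := by
              simp only [hMcons]; simp [h2]; omega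
            have hfil : List.filter (fun (y : String × Int) => y.2 == pvMaxSnd (x :: t) m) (x :: t)
                = List.filter (fun y => y.2 == pvMaxSnd (x :: t) m) t := List.filter_cons_of_neg hpx
            have hfind : List.find? (fun (y : String × Int) => y.2 == pvMaxSnd (x :: t) m) (x :: t)
                = List.find? (fun y => y.2 == pvMaxSnd (x :: t) m) t := List.find?_cons_of_neg hpx
            unfold pvSpec
            rw [hfil, hfind, hMcons]
            simp only [h3, if_true]
          · have hMm : pvMaxSnd t m = m := by omega
            have hany : ((x :: t).any (fun y => y.2 == m)) = true := by
              simp [List.any_cons, h2]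
            unfold pvSpec
            rw [hMcons]
            simp only [h3, if_false, hany, if_true]
            by_cases h4 : t.any (fun y => y.2 == m) = true
            · simp only [h4, if_true]
            · simp [h4]
        · -- strictly smaller score: state untouched
          simp only [h2, if_false]
          rw [ih]
          have hvm : x.2 < m := by omega
          by_cases h3 : m < pvMaxSnd t m
          · have hpx : ¬ ((fun (y : String × Int) => y.2 == pvMaxSnd (x :: t) m) x) = true := by
              simp only [hMcons]; simp; omega
            have hfil : List.filter (fun (y : String × Int) => y.2 == pvMaxSnd (x :: t) m) (x :: t)
                = List.filter (fun y => y.2 == pvMaxSnd (x :: t) m) t := List.filter_cons_of_neg hpx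
            have hfind : List.find? (fun (y : String × Int) => y.2 == pvMaxSnd (x :: t) m) (x :: t)
                = List.find? (fun y => y.2 == pvMaxSnd (x :: t) m) t := List.find?_cons_of_neg hpx
            unfold pvSpec
            rw [hfil, hfind, hMcons]
            simp only [h3, if_true]
          · have hMm : pvMaxSnd t m = m := by omega
            have hxne : (x.2 == m) = false := by simp; omega
            unfold pvSpec
            rw [hMcons]
            simp only [h3, if_false, List.any_cons, hxne, Bool.false_or]

theorem pvFoldMax_comm : ∀ (l : List Int) (m a : Int),
    l.foldl max (max m a) = max m (l.foldl max a) := by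
  intro l
  induction l with
  | nil => intro m a; simp
  | cons x t ih =>
      intro m a
      simp only [List.foldl_cons]
      rw [max_assoc, ih]

theorem get_unique_winner_spec : Claim_equal_get_unique_winner := by
  intro points _
  unfold Spec_get_unique_winner
  show (points.foldl pvStep ((0 : Int), (none : Option String))).2 = _
  rw [pvFold_snd]
  cases points with
  | nil => simp [get_unique_winner_alt, pvSpec, pvMaxSnd]
  | cons h t =>
      -- the python max over the dict values, as a fold
      have hmax : PySem.List.max? ((h :: t).map Prod.snd) (fun y => y)
          = some ((t.map Prod.snd).foldl max h.2) := by
        simp [PySem.List.max?_id_cons]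
      set best := (t.map Prod.snd).foldl max h.2 with hbest
      have hM0 : pvMaxSnd (h :: t) 0 = max 0 best := by
        simp only [pvMaxSnd, List.foldl_cons]
        have : (t.foldl (fun a x => max a x.2) (max 0 h.2))
            = (t.map Prod.snd).foldl max (max 0 h.2) := by
          rw [List.foldl_map]
        rw [this, pvFoldMax_comm]
      have hle : ∀ y ∈ (h :: t).map Prod.snd, y ≤ best := by
        intro y hy
        have := PySem.List.max?_isMax hmax y hy
        simpa using this
      unfold get_unique_winner_alt
      simp only [List.isEmpty_cons, Bool.false_eq_true, if_false, hmax]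
      by_cases hb : best ≤ 0
      · -- B returns none; A's spec also collapses to none
        have hM0' : pvMaxSnd (h :: t) 0 = 0 := by rw [hM0]; omega
        simp only [hb, if_true, pvSpec, hM0', lt_irrefl, if_false]
        by_cases hz : ((h :: t).any (fun x => x.2 == (0 : Int))) = true
        · simp [hz]
        · simp [hz]
      · -- positive unique-max branch
        have hbpos : 0 < best := by omega
        have hM0' : pvMaxSnd (h :: t) 0 = best := by rw [hM0]; omega
        simp only [hb, if_false, pvSpec, hM0', hbpos, if_true]
        by_cases hlen : (((h :: t).filter (fun x => x.2 == best)).length) = 1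
        · -- exactly one winner
          obtain ⟨w, hw⟩ := List.length_eq_one_iff.mp hlen
          simp [hw, pvFind_eq_head_filter, PySem.List.pyGet?, PySem.List.pyIdx?]
        · have hlen' : ¬ ((((h :: t).filter (fun x => x.2 == best)).map Prod.fst).length = 1) := by
            simpa using hlen
          simp [hlen]
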